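-- pv_equiv track=rewrite | github.com/catcam/hads | hads/parser.py | _trim_block_content
-- ===== SOURCE A (Python) =====
-- def _trim_block_content(lines: list[str], start_line: int) -> tuple[list[str], int]:
--     """Trim blank lines from block boundaries and return the last content line."""
--
--     start = 0
--     end = len(lines)
--     while start < end and not lines[start].strip():
--         start += 1
--     while end > start and not lines[end - 1].strip():
--         end -= 1
--
--     if start == end:
--         return [], start_line - 1
--
--     trimmed = lines[start:end]
--     line_end = start_line + end - 1
--     return trimmed, line_end
-- ===== SOURCE B (Python) =====
-- def _trim_block_content(lines: list[str], start_line: int) -> tuple[list[str], int]: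
--     """Trim blank lines from block boundaries and return the last content line."""
--     content = [i for i, l in enumerate(lines) if l.strip()]
--     if not content:
--         return [], start_line - 1
--     end = content[-1] + 1
--     return lines[content[0]:end], start_line + end - 1
-- ===== Notes on version B (the rewrite author's own statement) =====
-- stated objective: simpler
-- what changed: Replaces the two boundary-pointer while loops with a single enumerate-and-filter pass collecting the indices of all non-blank lines, then slices between the first and last collected index.
import Mathlib
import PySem

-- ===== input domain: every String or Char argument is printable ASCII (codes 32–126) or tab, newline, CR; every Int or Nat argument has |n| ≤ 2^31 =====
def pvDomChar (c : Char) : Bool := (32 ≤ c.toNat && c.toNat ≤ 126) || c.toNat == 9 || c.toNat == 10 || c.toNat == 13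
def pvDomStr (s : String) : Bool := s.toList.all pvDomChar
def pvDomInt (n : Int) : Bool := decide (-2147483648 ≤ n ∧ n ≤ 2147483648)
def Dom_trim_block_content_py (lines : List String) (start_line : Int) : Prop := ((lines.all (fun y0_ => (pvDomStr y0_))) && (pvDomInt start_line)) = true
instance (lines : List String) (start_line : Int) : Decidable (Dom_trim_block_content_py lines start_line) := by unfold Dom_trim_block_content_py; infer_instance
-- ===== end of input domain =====

-- B trims by collecting the indices of the non-blank lines in one pass and slicing
-- between the first and last of them (objective: simpler decomposition, same cost).

-- ===== PORT A =====
-- first while loop: advance start while the line at start is blank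
def pvTrimStartA (lines : List String) (e : Nat) (s : Nat) : Nat :=
  if s < e ∧ PySem.Str.strip (lines.getD s "") = "" then pvTrimStartA lines e (s + 1) else s
termination_by e - s
decreasing_by omega

-- second while loop: retreat end while the line at end-1 is blank
def pvTrimEndA (lines : List String) (s : Nat) (e : Nat) : Nat :=
  if s < e ∧ PySem.Str.strip (lines.getD (e - 1) "") = "" then pvTrimEndA lines s (e - 1) else e
termination_by e
decreasing_by omega

def trim_block_content_py (lines : List String) (start_line : Int) : List String × Int :=
  let start := pvTrimStartA lines lines.length 0
  let e := pvTrimEndA lines start lines.length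
  if start = e then ([], start_line - 1)
  else (PySem.List.slice lines (some (start : Int)) (some (e : Int)), start_line + (e : Int) - 1)

-- ===== PORT B =====
def trim_block_content_py_alt (lines : List String) (start_line : Int) : List String × Int :=
  let content := ((PySem.List.enumerate lines 0).filter
      (fun p => !(PySem.Str.strip p.2 == ""))).map Prod.fst
  match content with
  | [] => ([], start_line - 1)
  | i :: rest =>
    let e := (i :: rest).getLastD 0 + 1
    (PySem.List.slice lines (some i) (some e), start_line + e - 1)

-- ===== PRECONDITION & SPEC =====
def Spec_trim_block_content_py (lines : List String) (start_line : Int) (out : List String × Int) : Prop := out = trim_block_content_py_alt lines start_line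
instance (lines : List String) (start_line : Int) (out : List String × Int) : Decidable (Spec_trim_block_content_py lines start_line out) := by unfold Spec_trim_block_content_py; infer_instance

-- ===== CLAIM (what is proved, stated in full; the proofs are below) =====
def Claim_equal_trim_block_content_py : Prop := ∀ (lines : List String) (start_line : Int), Dom_trim_block_content_py lines start_line → Spec_trim_block_content_py lines start_line (trim_block_content_py lines start_line)

-- ===== LEMMAS AND PROOFS =====

-- a line is "blank" when its strip() is empty (falsy in Python)
def pvBlank (l : String) : Bool := PySem.Str.strip l == ""

-- B's index list, started at an arbitrary offset
def pvContentFrom (k : Int) (xs : List String) : List Int :=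
  ((PySem.List.enumerate xs k).filter (fun p => !(PySem.Str.strip p.2 == ""))).map Prod.fst

theorem pvTrimStartA_eq (lines : List String) (s : Nat) (hs : s ≤ lines.length) :
    pvTrimStartA lines lines.length s = s + ((lines.drop s).takeWhile pvBlank).length := by
  unfold pvTrimStartA
  by_cases h : s < lines.length
  · have hdrop : lines.drop s = lines[s] :: lines.drop (s + 1) :=
      List.drop_eq_getElem_cons h
    have hget : lines.getD s "" = lines[s] := by
      simp [List.getD_eq_getElem?_getD, List.getElem?_eq_getElem h]
    by_cases hb : PySem.Str.strip lines[s] = ""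
    · rw [if_pos ⟨h, by rw [hget]; exact hb⟩]
      rw [pvTrimStartA_eq lines (s + 1) (by omega)]
      rw [hdrop, List.takeWhile_cons, if_pos (by simp [pvBlank, hb])]
      simp; omega
    · rw [if_neg (by rw [hget]; tauto)]
      rw [hdrop, List.takeWhile_cons, if_neg (by simp [pvBlank, hb])]
      simp
  · rw [if_neg (by tauto)]
    have : lines.drop s = [] := List.drop_eq_nil_of_le (by omega)
    simp [this]
termination_by lines.length - s

theorem pvTrimEndA_eq (lines : List String) (s e : Nat) (hs : s ≤ e) (he : e ≤ lines.length) :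
    pvTrimEndA lines s e = s + (((lines.take e).drop s).reverse.dropWhile pvBlank).length := by
  unfold pvTrimEndA
  by_cases h : s < e
  · have hlt : e - 1 < lines.length := by omega
    have htake : lines.take e = lines.take (e - 1) ++ [lines[e - 1]] := by
      obtain ⟨m, rfl⟩ : ∃ m, e = m + 1 := ⟨e - 1, by omega⟩
      rw [List.take_add_one, List.getElem?_eq_getElem (show m < lines.length by omega)]
      simp
    have hget : lines.getD (e - 1) "" = lines[e - 1] := by
      simp [List.getD_eq_getElem?_getD, List.getElem?_eq_getElem hlt]
    have hdroprev : ((lines.take e).drop s).reverse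
        = lines[e - 1] :: ((lines.take (e - 1)).drop s).reverse := by
      rw [htake, List.drop_append_of_le_length (by simp; omega)]
      simp
    by_cases hb : PySem.Str.strip lines[e - 1] = ""
    · rw [if_pos ⟨h, by rw [hget]; exact hb⟩]
      rw [pvTrimEndA_eq lines s (e - 1) (by omega) (by omega)]
      rw [hdroprev, List.dropWhile_cons, if_pos (by simp [pvBlank, hb])]
    · rw [if_neg (by rw [hget]; tauto)]
      rw [hdroprev, List.dropWhile_cons, if_neg (by simp [pvBlank, hb])]
      simp
      omega
  · rw [if_neg (by tauto)]
    have hse : s = e := by omega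
    have hnil : (lines.take e).drop s = [] := List.drop_eq_nil_of_le (by simp; omega)
    simp [hse]
termination_by e

theorem pvContentFrom_nil_of_blank (xs : List String) (k : Int)
    (h : ∀ x ∈ xs, pvBlank x = true) : pvContentFrom k xs = [] := by
  induction xs generalizing k with
  | nil => simp [pvContentFrom, PySem.List.enumerate_nil]
  | cons x xs ih =>
    have hx : pvBlank x = true := h x (by simp)
    have hxs := ih (k + 1) (fun y hy => h y (by simp [hy]))
    simp only [pvContentFrom, PySem.List.enumerate_cons, List.filter_cons] at *
    rw [if_neg (by simp_all [pvBlank])]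
    exact hxs

theorem pvContentFrom_append (xs ys : List String) (k : Int) :
    pvContentFrom k (xs ++ ys) = pvContentFrom k xs ++ pvContentFrom (k + xs.length) ys := by
  simp [pvContentFrom, PySem.List.enumerate_append, List.filter_append]

theorem pvContentFrom_cons_nonblank (x : String) (xs : List String) (k : Int)
    (h : pvBlank x = false) :
    pvContentFrom k (x :: xs) = k :: pvContentFrom (k + 1) xs := by
  simp only [pvContentFrom, PySem.List.enumerate_cons, List.filter_cons]
  rw [if_pos (by simp_all [pvBlank])]
  simp

theorem pvContentFrom_concat_nonblank (xs : List String) (y : String) (k : Int)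
    (h : pvBlank y = false) :
    pvContentFrom k (xs ++ [y]) = pvContentFrom k xs ++ [k + xs.length] := by
  rw [pvContentFrom_append]
  congr 1
  simp only [pvContentFrom, PySem.List.enumerate_cons, PySem.List.enumerate_nil,
    List.filter_cons]
  rw [if_pos (by simp_all [pvBlank])]
  simp

-- ===== VERDICT (by name: the statement is the Claim_ definition above) =====
theorem trim_block_content_py_spec : Claim_equal_trim_block_content_py := by
  intro lines sl _
  unfold Spec_trim_block_content_py
  -- decompose lines = front ++ rest, front the leading blanks
  set front := lines.takeWhile pvBlank with hfront
  set rest := lines.dropWhile pvBlank with hrest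
  have hsplit : lines = front ++ rest := (List.takeWhile_append_dropWhile).symm
  have hfrontblank : ∀ x ∈ front, pvBlank x = true := fun x hx =>
    List.mem_takeWhile_imp hx
  have hs0 : pvTrimStartA lines lines.length 0 = front.length := by
    rw [pvTrimStartA_eq lines 0 (by omega)]
    simp [hfront]
  have hfrontlen : front.length ≤ lines.length := by
    conv_rhs => rw [hsplit]
    simp
  have hdropfront : lines.drop front.length = rest := by
    conv_lhs => rw [hsplit]
    simp
  have he0 : pvTrimEndA lines front.length lines.length
      = front.length + (rest.reverse.dropWhile pvBlank).length := by
    rw [pvTrimEndA_eq lines front.length lines.length hfrontlen (le_refl _)]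
    rw [List.take_length, hdropfront]
  rcases hcr : rest.reverse.dropWhile pvBlank with _ | ⟨y, ys⟩
  · -- everything blank: rest itself is all blank (its reverse dropWhile is empty)
    have hrestblank : ∀ x ∈ rest, pvBlank x = true := by
      intro x hx
      have := (List.dropWhile_eq_nil_iff (l := rest.reverse) (p := pvBlank)).1 hcr
      exact this x (by simp [hx])
    have hallblank : ∀ x ∈ lines, pvBlank x = true := by
      intro x hx
      rw [hsplit] at hx
      rcases List.mem_append.1 hx with h | h
      · exact hfrontblank x h
      · exact hrestblank x h
    have hB : ((PySem.List.enumerate lines 0).filter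
        (fun p => !(PySem.Str.strip p.2 == ""))).map Prod.fst = [] :=
      pvContentFrom_nil_of_blank lines 0 hallblank
    have hA : pvTrimEndA lines front.length lines.length = front.length := by
      rw [he0, hcr]; simp
    simp [trim_block_content_py, trim_block_content_py_alt, hB, hs0, hA]
  · -- there is content: rest = core ++ backr with core ending (and starting) non-blank
    have hy : pvBlank y = false := by
      have := List.head_dropWhile_not (p := pvBlank) (l := rest.reverse) (by simp [hcr])
      simpa [hcr] using this
    set backr := (rest.reverse.takeWhile pvBlank).reverse with hbackr
    set core := (y :: ys).reverse with hcore
    have hrestsplit : rest = core ++ backr := by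
      have : rest.reverse = rest.reverse.takeWhile pvBlank ++ rest.reverse.dropWhile pvBlank :=
        (List.takeWhile_append_dropWhile).symm
      calc rest = rest.reverse.reverse := by simp
        _ = core ++ backr := by rw [this]; simp [hcore, hbackr, hcr]
    have hbackrblank : ∀ x ∈ backr, pvBlank x = true := by
      intro x hx
      exact List.mem_takeWhile_imp (by simpa [hbackr] using hx)
    -- core is non-empty and its head is non-blank
    rcases hcc : core with _ | ⟨r, core'⟩
    · simp [hcore] at hcc
    have hr : pvBlank r = false := by
      have hrrest : rest = r :: (core' ++ backr) := by rw [hrestsplit, hcc]; simp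
      have := List.head_dropWhile_not (p := pvBlank) (l := lines) (by rw [← hrest, hrrest]; simp)
      simpa [← hrest, hrrest] using this
    -- core also ends with y, non-blank
    have hcore2 : core = ys.reverse ++ [y] := by simp [hcore]
    -- B's content list
    have hcontent : ((PySem.List.enumerate lines 0).filter
        (fun p => !(PySem.Str.strip p.2 == ""))).map Prod.fst
        = pvContentFrom (front.length) core := by
      have h1 : ((PySem.List.enumerate lines 0).filter
          (fun p => !(PySem.Str.strip p.2 == ""))).map Prod.fst = pvContentFrom 0 lines := rfl
      rw [h1]
      conv_lhs => rw [hsplit, hrestsplit]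
      rw [← List.append_assoc, pvContentFrom_append, pvContentFrom_append,
        pvContentFrom_nil_of_blank front 0 hfrontblank,
        pvContentFrom_nil_of_blank backr _ hbackrblank]
      simp
    have hB2 : pvContentFrom (front.length) core
        = (front.length : Int) :: pvContentFrom ((front.length : Int) + 1) core' := by
      rw [hcc, pvContentFrom_cons_nonblank _ _ _ hr]
    have hlast : pvContentFrom (front.length) core
        = pvContentFrom (front.length) ys.reverse ++ [(front.length : Int) + ys.length] := by
      rw [hcore2, pvContentFrom_concat_nonblank _ _ _ hy]
      simp
    have hG : ((front.length : Int) :: pvContentFrom ((front.length : Int) + 1) core').getLastD 0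
        = (front.length : Int) + ys.length := by
      rw [← hB2, hlast, List.getLastD_concat]
    -- A's end pointer
    have heA : pvTrimEndA lines front.length lines.length = front.length + (ys.length + 1) := by
      rw [he0, hcr]; simp
    unfold trim_block_content_py trim_block_content_py_alt
    rw [hcontent.trans hB2]
    simp only [hs0, heA, List.getLastD_cons]
    rw [List.getLastD_cons] at hG
    rw [if_neg (by omega), hG]
    have hcast : ((front.length + (ys.length + 1) : Nat) : Int)
        = (front.length : Int) + (ys.length : Int) + 1 := by push_cast; ring
    rw [hcast]
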